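-- pv_equiv track=rewrite | github.com/lupanevelina/tema_din_clasa_26.09 | prob_bazele.py | inmultirea_convertita
-- ===== SOURCE A (Python) =====
-- def conversia_in_baza_10(n,b):
--     i=0
--     sum=0
--     while n>0:
--         r=n%10
--         z=r*(b**i)
--         n//=10
--         sum+=z
--         i+=1
--     return sum
--
-- def inmultire(q,w,b):
--     q1=conversia_in_baza_10(q,b)
--     w1=conversia_in_baza_10(w,b)
--     x=q1*w1
--     return x
--
-- def inmultirea_convertita(q,w,b):
--     x=inmultire(q,w,b)
--     lista=[]
--     while x>0:
--         o=x//b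
--         nr=x-(b*o)
--         lista.append(nr)
--         x=o
--     m=reversed(lista)
--     l=''.join(map(str,m))
--     return l
-- ===== SOURCE B (Python) =====
-- def inmultirea_convertita(q, w, b):
--     # Horner evaluation of the decimal-digit list instead of accumulating b**i powers,
--     # and a direct most-significant-first recursion instead of list+reverse+join.
--     def digits10(n):
--         ds = []
--         while n > 0:
--             ds.append(n % 10)
--             n //= 10
--         return ds
--
--     def value(n):
--         v = 0
--         for d in reversed(digits10(n)):
--             v = v * b + d
--         return v
--
--     def render(x):
--         if x <= 0:
--             return ''
--         o = x // b
--         return render(o) + str(x - b * o)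
--
--     return render(value(q) * value(w))
-- ===== Notes on version B (the rewrite author's own statement) =====
-- stated objective: simpler
-- what changed: B evaluates the decimal digit list by a Horner fold (no b**i power computed per digit) and builds the output string most-significant-first by direct recursion, replacing A's append-list/reversed/map-str/join pipeline.
import Mathlib
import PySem

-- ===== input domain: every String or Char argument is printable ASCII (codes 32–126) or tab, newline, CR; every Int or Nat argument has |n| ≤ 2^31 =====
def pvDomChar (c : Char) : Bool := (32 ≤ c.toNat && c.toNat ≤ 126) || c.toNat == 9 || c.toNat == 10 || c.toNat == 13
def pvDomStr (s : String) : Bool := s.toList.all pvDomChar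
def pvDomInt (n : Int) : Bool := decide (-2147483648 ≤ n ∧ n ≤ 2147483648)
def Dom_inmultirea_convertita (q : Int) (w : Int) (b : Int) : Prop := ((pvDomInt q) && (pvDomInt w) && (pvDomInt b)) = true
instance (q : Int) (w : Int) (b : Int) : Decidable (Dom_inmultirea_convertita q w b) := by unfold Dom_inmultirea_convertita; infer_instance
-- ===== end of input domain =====

-- B replaces A's per-digit b**i power accumulation by a Horner fold over the decimal digit list and
-- builds the base-b string most-significant-first by direct recursion (no list/reverse/join); same values.

-- ===== PORT A =====
-- while n>0: r=n%10; z=r*(b**i); n//=10; sum+=z; i+=1   (fuel = n.toNat+1; n strictly decreases while n>0, so fuel never runs out)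
def pvAConvGo (fuel : Nat) (n : Int) (b : Int) (i : Nat) (sum : Int) : Int :=
  match fuel with
  | 0 => sum
  | f + 1 =>
    if n > 0 then
      pvAConvGo f (PySem.Int.floordiv n 10) b (i + 1) (sum + PySem.Int.mod n 10 * b ^ i)
    else sum

def conversia_in_baza_10 (n : Int) (b : Int) : Int := pvAConvGo (n.toNat + 1) n b 0 0

def inmultire (q : Int) (w : Int) (b : Int) : Int :=
  conversia_in_baza_10 q b * conversia_in_baza_10 w b

-- while x>0: o=x//b; nr=x-(b*o); lista.append(nr); x=o   (fuel = x.toNat+1; sufficient whenever the Python loop terminates)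
def pvADigGo (fuel : Nat) (x : Int) (b : Int) (lista : List Int) : List Int :=
  match fuel with
  | 0 => lista
  | f + 1 =>
    if x > 0 then
      pvADigGo f (PySem.Int.floordiv x b) b (lista ++ [x - b * PySem.Int.floordiv x b])
    else lista

def inmultirea_convertita (q : Int) (w : Int) (b : Int) : String :=
  let x := inmultire q w b
  let lista := pvADigGo (x.toNat + 1) x b []
  PySem.Str.join "" (lista.reverse.map PySem.Int.toStr)

-- ===== PORT B =====
-- while n>0: ds.append(n%10); n//=10
def pvBDigits10 (fuel : Nat) (n : Int) (ds : List Int) : List Int :=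
  match fuel with
  | 0 => ds
  | f + 1 =>
    if n > 0 then pvBDigits10 f (PySem.Int.floordiv n 10) (ds ++ [PySem.Int.mod n 10]) else ds

-- v = 0; for d in reversed(digits10(n)): v = v*b + d
def pvBValue (n : Int) (b : Int) : Int :=
  ((pvBDigits10 (n.toNat + 1) n []).reverse).foldl (fun v d => v * b + d) 0

-- render(x) = '' if x<=0 else render(x//b) + str(x - b*(x//b))   (fuel = x.toNat+1)
def pvBRender (fuel : Nat) (x : Int) (b : Int) : String :=
  match fuel with
  | 0 => ""
  | f + 1 =>
    if x ≤ 0 then ""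
    else pvBRender f (PySem.Int.floordiv x b) b ++ PySem.Int.toStr (x - b * PySem.Int.floordiv x b)

def inmultirea_convertita_alt (q : Int) (w : Int) (b : Int) : String :=
  let x := pvBValue q b * pvBValue w b
  pvBRender (x.toNat + 1) x b

-- ===== PRECONDITION & SPEC =====
-- Pre_ excludes exactly the inputs on which Python A does not return: b = 1 with both factors
-- positive (the conversion loop 'x //= 1' never decreases x: infinite loop) and b = 0 with a
-- positive product of the units digits (ZeroDivisionError in 'o = x // b').
def Pre_inmultirea_convertita (q : Int) (w : Int) (b : Int) : Prop :=
  (b = 0 → q ≤ 0 ∨ w ≤ 0 ∨ PySem.Int.mod q 10 = 0 ∨ PySem.Int.mod w 10 = 0) ∧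
  (b = 1 → q ≤ 0 ∨ w ≤ 0)
instance (q : Int) (w : Int) (b : Int) : Decidable (Pre_inmultirea_convertita q w b) := by
  unfold Pre_inmultirea_convertita; infer_instance

def pvWitness_inmultirea_convertita : Int × Int × Int := (12, 10, 2)

def Spec_inmultirea_convertita (q : Int) (w : Int) (b : Int) (out : String) : Prop := out = inmultirea_convertita_alt q w b
instance (q : Int) (w : Int) (b : Int) (out : String) : Decidable (Spec_inmultirea_convertita q w b out) := by unfold Spec_inmultirea_convertita; infer_instance

-- ===== CLAIM (what is proved, stated in full; the proofs are below) =====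
def Claim_equal_inmultirea_convertita : Prop := ∀ (q : Int) (w : Int) (b : Int), Dom_inmultirea_convertita q w b → Pre_inmultirea_convertita q w b → Spec_inmultirea_convertita q w b (inmultirea_convertita q w b)

-- ===== LEMMAS AND PROOFS =====

-- B's digit loop with any accumulator = accumulator ++ the loop from [].
theorem pvBDigits10_acc (f : Nat) : ∀ (n : Int) (ds : List Int),
    pvBDigits10 f n ds = ds ++ pvBDigits10 f n [] := by
  induction f with
  | zero => intro n ds; simp [pvBDigits10]
  | succ f ih =>
    intro n ds
    simp only [pvBDigits10]
    by_cases h : n > 0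
    · simp only [if_pos h]
      rw [ih _ (ds ++ _), ih _ ([] ++ _)]
      simp
    · simp [if_neg h]

-- the Horner fold over the reversed LSB-first digit list, as a function of that list
def pvHorner (b : Int) (ds : List Int) : Int := ds.reverse.foldl (fun v d => v * b + d) 0

theorem pvHorner_nil (b : Int) : pvHorner b [] = 0 := rfl

theorem pvHorner_cons (b d : Int) (ds : List Int) :
    pvHorner b (d :: ds) = d + b * pvHorner b ds := by
  simp [pvHorner, List.foldl_append]; ring

-- A's power-accumulating conversion loop equals sum + b^i * (Horner of B's digit list), same fuel.
theorem pvAConvGo_eq (f : Nat) : ∀ (n b : Int) (i : Nat) (sum : Int),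
    pvAConvGo f n b i sum = sum + b ^ i * pvHorner b (pvBDigits10 f n []) := by
  induction f with
  | zero => intro n b i sum; simp [pvAConvGo, pvBDigits10, pvHorner_nil]
  | succ f ih =>
    intro n b i sum
    simp only [pvAConvGo, pvBDigits10]
    by_cases h : n > 0
    · simp only [if_pos h]
      rw [ih, pvBDigits10_acc f (PySem.Int.floordiv n 10) ([] ++ _)]
      simp only [List.nil_append, List.singleton_append]
      rw [pvHorner_cons]
      ring
    · simp [if_neg h, pvHorner_nil]

theorem pvConv_eq_value (n b : Int) : conversia_in_baza_10 n b = pvBValue n b := by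
  rw [conversia_in_baza_10, pvAConvGo_eq, pvBValue]
  simp [pvHorner]

theorem pvJoin_cons (s : String) (l : List String) :
    PySem.Str.join "" (s :: l) = s ++ PySem.Str.join "" l := by
  have h : ([] : List Char).intercalate (s.toList :: l.map String.toList)
      = s.toList ++ [].intercalate (l.map String.toList) := by
    cases l <;> simp [List.intercalate]
  simp [PySem.Str.join, PySem.Chars.join, h, String.ofList_append, String.ofList_toList]

-- A's digit-collecting loop, reversed, mapped to strings and joined, equals B's recursion, same fuel.
theorem pvADigGo_join (f : Nat) : ∀ (x b : Int) (acc : List Int),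
    PySem.Str.join "" ((pvADigGo f x b acc).reverse.map PySem.Int.toStr)
      = pvBRender f x b ++ PySem.Str.join "" (acc.reverse.map PySem.Int.toStr) := by
  induction f with
  | zero => intro x b acc; simp [pvADigGo, pvBRender, String.empty_append]
  | succ f ih =>
    intro x b acc
    simp only [pvADigGo, pvBRender]
    by_cases h : x > 0
    · rw [if_pos h, if_neg (by omega : ¬ x ≤ 0), ih]
      simp only [List.reverse_append, List.reverse_cons, List.reverse_nil, List.nil_append,
        List.singleton_append, List.map_cons]
      rw [pvJoin_cons, ← String.append_assoc]
    · rw [if_neg h, if_pos (by omega : x ≤ 0), String.empty_append]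

-- ===== VERDICT (by name: the statement is the Claim_ definition above) =====
theorem inmultirea_convertita_spec : Claim_equal_inmultirea_convertita := by
  intro q w b _ _
  unfold Spec_inmultirea_convertita inmultirea_convertita inmultirea_convertita_alt inmultire
  rw [pvConv_eq_value, pvConv_eq_value, pvADigGo_join]
  simp [PySem.Str.join, PySem.Chars.join, List.intercalate]
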